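-- pv_equiv track=rewrite | github.com/MrSpoony/ConsoleTetris | TetrisLinux.py | addPieceatPos
-- ===== SOURCE A (Python) =====
-- def addPieceatPos(block, x, y, board):
--     # Adds Piece at exact pos to new Board
--     pieceWidth = len(block[0])
--     pieceHeight = len(block)
--     pieceBoard = board
--
--     for row in range(len(pieceBoard)):
--         for j in range(len(pieceBoard[row])):
--             if row >= y and row < y + pieceHeight and j >= x and j < x+pieceWidth:
--                 pieceBoard[row][j] = block[row-y][j-x]
--     return pieceBoard
-- ===== SOURCE B (Python) =====
-- def addPieceatPos(block, x, y, board):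
--     # Piece-sized write instead of a full-board scan; mutates board in place like A.
--     pieceHeight = len(block)
--     pieceWidth = len(block[0])
--     for i in range(pieceHeight):
--         row = y + i
--         if 0 <= row < len(board):
--             r = board[row]
--             for jj in range(pieceWidth):
--                 col = x + jj
--                 if 0 <= col < len(r):
--                     r[col] = block[i][jj]
--     return board
-- ===== Notes on version B (the rewrite author's own statement) =====
-- stated objective: alternative
-- what changed: B loops over the piece's cells and writes each into its board target (skipping out-of-board targets) instead of A's scan of every board cell testing whether it lies inside the piece's window; measured speed was comparable on the generated inputs.
import Mathlib
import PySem

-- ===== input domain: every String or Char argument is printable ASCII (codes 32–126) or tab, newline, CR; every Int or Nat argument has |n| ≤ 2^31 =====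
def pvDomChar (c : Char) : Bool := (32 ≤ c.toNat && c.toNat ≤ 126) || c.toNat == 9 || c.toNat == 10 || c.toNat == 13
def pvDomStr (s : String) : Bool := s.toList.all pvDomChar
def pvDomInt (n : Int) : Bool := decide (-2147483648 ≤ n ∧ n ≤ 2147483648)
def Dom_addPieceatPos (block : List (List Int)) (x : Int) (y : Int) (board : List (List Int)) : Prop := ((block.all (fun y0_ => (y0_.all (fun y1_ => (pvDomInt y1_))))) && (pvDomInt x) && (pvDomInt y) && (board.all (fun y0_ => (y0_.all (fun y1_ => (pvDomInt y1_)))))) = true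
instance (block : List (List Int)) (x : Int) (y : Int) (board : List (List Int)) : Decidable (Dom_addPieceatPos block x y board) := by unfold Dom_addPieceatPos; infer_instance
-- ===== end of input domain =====

-- B writes only the piece-sized window (loop over the piece's cells) instead of scanning the
-- whole board; like A it mutates the `board` argument in place and returns it — the equivalence
-- proved here is about the returned value.

-- ===== PORT A =====
-- A's outer loop over board rows touches only row `row` in each iteration, so it is ported as
-- mapIdx over the board; the inner loop over column indices is the foldl over List.range.
def addPieceatPos (block : List (List Int)) (x : Int) (y : Int) (board : List (List Int)) : List (List Int) :=
  let W : Int := (block.headI.length : Int)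
  let H : Int := (block.length : Int)
  board.mapIdx (fun (row : Nat) (r : List Int) =>
    (List.range r.length).foldl (fun (r' : List Int) (j : Nat) =>
      if y ≤ (row : Int) ∧ (row : Int) < y + H ∧ x ≤ (j : Int) ∧ (j : Int) < x + W then
        r'.set j ((block.getD ((row : Int) - y).toNat []).getD (((j : Int) - x).toNat) 0)
      else r') r)

-- ===== PORT B =====
def addPieceatPos_alt (block : List (List Int)) (x : Int) (y : Int) (board : List (List Int)) : List (List Int) :=
  let H : Nat := block.length
  let W : Nat := block.headI.length
  (List.range H).foldl (fun (bd : List (List Int)) (i : Nat) =>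
    let row : Int := y + (i : Int)
    if 0 ≤ row ∧ row < (bd.length : Int) then
      bd.set row.toNat
        ((List.range W).foldl (fun (r : List Int) (jj : Nat) =>
          let col : Int := x + (jj : Int)
          if 0 ≤ col ∧ col < (r.length : Int) then
            r.set col.toNat ((block.getD i []).getD jj 0)
          else r) (bd.getD row.toNat []))
    else bd) board

-- ===== PRECONDITION & SPEC =====
-- Pre_ excludes exactly the inputs where the Python A raises: an empty block (len(block[0]) is an
-- IndexError) and ragged blocks whose short row is actually indexed (block[row-y][j-x] IndexError).
def Pre_addPieceatPos (block : List (List Int)) (x : Int) (y : Int) (board : List (List Int)) : Prop :=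
  block ≠ [] ∧
  ∀ i ∈ List.range block.length, ∀ jj ∈ List.range block.headI.length,
    (0 ≤ y + (i : Int) ∧ y + (i : Int) < (board.length : Int) ∧
     0 ≤ x + (jj : Int) ∧ x + (jj : Int) < ((board.getD (y + (i : Int)).toNat []).length : Int)) →
    jj < (block.getD i []).length
instance (block : List (List Int)) (x : Int) (y : Int) (board : List (List Int)) : Decidable (Pre_addPieceatPos block x y board) := by unfold Pre_addPieceatPos; infer_instance

def pvWitness_addPieceatPos : List (List Int) × Int × Int × List (List Int) :=
  ([[7, 8], [9, 10]], 1, 0, [[0, 0, 0], [0, 0, 0], [0, 0, 0]])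

def Spec_addPieceatPos (block : List (List Int)) (x : Int) (y : Int) (board : List (List Int)) (out : List (List Int)) : Prop := out = addPieceatPos_alt block x y board
instance (block : List (List Int)) (x : Int) (y : Int) (board : List (List Int)) (out : List (List Int)) : Decidable (Spec_addPieceatPos block x y board out) := by unfold Spec_addPieceatPos; infer_instance

-- ===== CLAIM (what is proved, stated in full; the proofs are below) =====
def Claim_equal_addPieceatPos : Prop := ∀ (block : List (List Int)) (x : Int) (y : Int) (board : List (List Int)), Dom_addPieceatPos block x y board → Pre_addPieceatPos block x y board → Spec_addPieceatPos block x y board (addPieceatPos block x y board)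

-- ===== LEMMAS AND PROOFS =====

-- common pointwise characterisation both ports are reduced to
def pvSpec (block : List (List Int)) (x : Int) (y : Int) (board : List (List Int)) : List (List Int) :=
  board.mapIdx (fun ρ r => r.mapIdx (fun j c =>
    if y ≤ (ρ : Int) ∧ (ρ : Int) < y + (block.length : Int) ∧
       x ≤ (j : Int) ∧ (j : Int) < x + (block.headI.length : Int)
    then (block.getD ((ρ : Int) - y).toNat []).getD (((j : Int) - x).toNat) 0 else c))

theorem mapIdx_congr' {α β : Type} (f g : Nat → α → β) (l : List α)
    (h : ∀ i (hi : i < l.length), f i l[i] = g i l[i]) : l.mapIdx f = l.mapIdx g := by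
  apply List.ext_getElem (by simp)
  intro i h1 h2
  simp only [List.getElem_mapIdx]
  exact h i (by simpa using h1)

theorem mapIdx_id' {α : Type} (l : List α) : l.mapIdx (fun _ c => c) = l := by
  apply List.ext_getElem (by simp)
  intro i h1 h2; simp

-- A's inner loop: fold of conditional in-place writes at index j = mapIdx
theorem setFold_eq_mapIdx {α : Type} (P : Nat → Prop) [DecidablePred P] (v : Nat → α)
    (n : Nat) (l : List α) :
    (List.range n).foldl (fun (acc : List α) (j : Nat) => if P j then acc.set j (v j) else acc) l
      = l.mapIdx (fun j c => if j < n ∧ P j then v j else c) := by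
  induction n with
  | zero =>
    rw [List.range_zero, List.foldl_nil]
    symm
    refine (mapIdx_congr' _ (fun _ c => c) l ?_).trans (mapIdx_id' l)
    intro i hi
    split_ifs with h
    · omega
    · rfl
  | succ n ih =>
    rw [List.range_succ, List.foldl_append, ih]
    simp only [List.foldl_cons, List.foldl_nil]
    by_cases hc : P n
    · rw [if_pos hc]
      apply List.ext_getElem (by simp)
      intro i h1 h2
      have hi : i < l.length := by simpa using h2
      rw [List.getElem_set]
      simp only [List.getElem_mapIdx]
      by_cases hni : n = i
      · subst hni
        rw [if_pos rfl, if_pos ⟨by omega, hc⟩]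
      · rw [if_neg hni]
        by_cases hA : i < n ∧ P i
        · rw [if_pos hA, if_pos ⟨by omega, hA.2⟩]
        · rw [if_neg hA]
          by_cases hB : i < n + 1 ∧ P i
          · exfalso
            have hin : i = n := by
              by_contra hne
              exact hA ⟨by omega, hB.2⟩
            exact hni hin.symm
          · rw [if_neg hB]
    · rw [if_neg hc]
      apply List.ext_getElem (by simp)
      intro i h1 h2
      have hi : i < l.length := by simpa using h2
      simp only [List.getElem_mapIdx]
      by_cases hA : i < n ∧ P i
      · rw [if_pos hA, if_pos ⟨by omega, hA.2⟩]
      · rw [if_neg hA]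
        by_cases hB : i < n + 1 ∧ P i
        · exfalso
          have hin : i = n := by
            by_contra hne
            exact hA ⟨by omega, hB.2⟩
          exact hc (hin ▸ hB.2)
        · rw [if_neg hB]

-- B's inner loop: conditional writes at offset columns x+jj = mapIdx over the row
theorem offFold_eq_mapIdx {α : Type} (x : Int) (v : Nat → α) (n : Nat) (l : List α) :
    (List.range n).foldl (fun (acc : List α) (jj : Nat) =>
        if 0 ≤ x + (jj : Int) ∧ x + (jj : Int) < (acc.length : Int) then
          acc.set (x + (jj : Int)).toNat (v jj)
        else acc) l
      = l.mapIdx (fun k c => if x ≤ (k : Int) ∧ (k : Int) < x + (n : Int)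
          then v ((k : Int) - x).toNat else c) := by
  induction n with
  | zero =>
    rw [List.range_zero, List.foldl_nil]
    symm
    refine (mapIdx_congr' _ (fun _ c => c) l ?_).trans (mapIdx_id' l)
    intro i hi
    split_ifs with h
    · omega
    · rfl
  | succ n ih =>
    rw [List.range_succ, List.foldl_append, ih]
    simp only [List.foldl_cons, List.foldl_nil, List.length_mapIdx]
    by_cases hc : 0 ≤ x + (n : Int) ∧ x + (n : Int) < (l.length : Int)
    · rw [if_pos hc]
      apply List.ext_getElem (by simp)
      intro i h1 h2
      have hi : i < l.length := by simpa using h2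
      rw [List.getElem_set]
      simp only [List.getElem_mapIdx]
      split_ifs <;> simp_all <;> first | omega | (congr 1; omega)
    · rw [if_neg hc]
      apply List.ext_getElem (by simp)
      intro i h1 h2
      have hi : i < l.length := by simpa using h2
      simp only [List.getElem_mapIdx]
      split_ifs <;> simp_all <;> first | omega | (congr 1; omega)

-- B's outer loop: each iteration rewrites exactly row y+i
theorem rowFold_eq_mapIdx {α : Type} (y : Int) (f : Nat → α → α) (d : α)
    (n : Nat) (l : List α) :
    (List.range n).foldl (fun (acc : List α) (i : Nat) =>
        if 0 ≤ y + (i : Int) ∧ y + (i : Int) < (acc.length : Int) then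
          acc.set (y + (i : Int)).toNat (f i (acc.getD (y + (i : Int)).toNat d))
        else acc) l
      = l.mapIdx (fun ρ r => if y ≤ (ρ : Int) ∧ (ρ : Int) < y + (n : Int)
          then f ((ρ : Int) - y).toNat r else r) := by
  induction n with
  | zero =>
    rw [List.range_zero, List.foldl_nil]
    symm
    refine (mapIdx_congr' _ (fun _ c => c) l ?_).trans (mapIdx_id' l)
    intro i hi
    split_ifs with h
    · omega
    · rfl
  | succ n ih =>
    rw [List.range_succ, List.foldl_append, ih]
    simp only [List.foldl_cons, List.foldl_nil, List.length_mapIdx]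
    by_cases hc : 0 ≤ y + (n : Int) ∧ y + (n : Int) < (l.length : Int)
    · rw [if_pos hc]
      have hlt : (y + (n : Int)).toNat < l.length := by omega
      have hget : ((l.mapIdx fun ρ r => if y ≤ (ρ : Int) ∧ (ρ : Int) < y + (n : Int)
          then f ((ρ : Int) - y).toNat r else r).getD (y + (n : Int)).toNat d)
          = l[(y + (n : Int)).toNat]'hlt := by
        rw [List.getD_eq_getElem _ _ (by simpa using hlt)]
        simp only [List.getElem_mapIdx]
        split_ifs with h'
        · omega
        · rfl
      simp only [hget]
      apply List.ext_getElem (by simp)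
      intro i h1 h2
      have hi : i < l.length := by simpa using h2
      rw [List.getElem_set]
      simp only [List.getElem_mapIdx]
      split_ifs <;> simp_all <;> first | omega | (congr 1; omega)
    · rw [if_neg hc]
      apply List.ext_getElem (by simp)
      intro i h1 h2
      have hi : i < l.length := by simpa using h1
      simp only [List.getElem_mapIdx]
      split_ifs <;> simp_all <;> first | omega | (congr 1; omega)

theorem A_eq_spec (block : List (List Int)) (x y : Int) (board : List (List Int)) :
    addPieceatPos block x y board = pvSpec block x y board := by
  unfold addPieceatPos pvSpec
  dsimp only
  apply mapIdx_congr'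
  intro ρ hρ
  rw [setFold_eq_mapIdx (fun j => y ≤ (ρ : Int) ∧ (ρ : Int) < y + (block.length : Int) ∧
        x ≤ (j : Int) ∧ (j : Int) < x + (block.headI.length : Int))]
  apply mapIdx_congr'
  intro j hj
  split_ifs <;> simp_all

theorem B_eq_spec (block : List (List Int)) (x y : Int) (board : List (List Int)) :
    addPieceatPos_alt block x y board = pvSpec block x y board := by
  unfold addPieceatPos_alt pvSpec
  dsimp only
  rw [rowFold_eq_mapIdx y (fun (i : Nat) (r : List Int) =>
        (List.range block.headI.length).foldl (fun (r' : List Int) (jj : Nat) =>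
          if 0 ≤ x + (jj : Int) ∧ x + (jj : Int) < (r'.length : Int) then
            r'.set (x + (jj : Int)).toNat ((block.getD i []).getD jj 0)
          else r') r) ([] : List Int)]
  apply mapIdx_congr'
  intro ρ hρ
  split_ifs with hρy
  · rw [offFold_eq_mapIdx]
    apply mapIdx_congr'
    intro j hj
    split_ifs <;> simp_all
  · symm
    rw [show (board[ρ].mapIdx fun j c =>
        if y ≤ (ρ : Int) ∧ (ρ : Int) < y + (block.length : Int) ∧
           x ≤ (j : Int) ∧ (j : Int) < x + (block.headI.length : Int)
        then (block.getD ((ρ : Int) - y).toNat []).getD (((j : Int) - x).toNat) 0 else c)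
        = board[ρ].mapIdx (fun _ c => c) from ?_, mapIdx_id']
    apply mapIdx_congr'
    intro j hj
    split_ifs with h
    · exact absurd (⟨h.1, h.2.1⟩ : y ≤ (ρ : Int) ∧ (ρ : Int) < y + (block.length : Int)) hρy
    · rfl

-- ===== VERDICT (by name: the statement is the Claim_ definition above) =====
theorem addPieceatPos_spec : Claim_equal_addPieceatPos := by
  intro block x y board _ _
  unfold Spec_addPieceatPos
  rw [A_eq_spec, B_eq_spec]
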